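-- pv_equiv track=rewrite | github.com/Lioscro/ist4-pcp-analysis | solvers/example/student2/solver.py | _findDedups
-- ===== SOURCE A (Python) =====
-- def _findDedups(s):
--     '''
--     Given a string, finds all the possible deduplications as a list of strings.
--     This list is sorted by decreasing duplication size, which is equivalent
--     to sorting by increasing deduplication string length.
--     '''
--     l = len(s)
--     dedups = set()
--
--     # Iterate through all possible deduplication lengths.
--     for dup_length in range(1, int(l / 2) + 1):
--         for i in range(l - 2 * dup_length + 1):
--             first = s[i:i+dup_length]
--             second = s[i+dup_length:i + 2 * dup_length]
--
--             # If there is a duplication, generate the deduplication string.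
--             if first == second:
--                 new_s = s[:i] + s[i+dup_length:]
--                 dedups.add(new_s)
--
--     return dedups
-- ===== SOURCE B (Python) =====
-- def _findDedups(s):
--     '''
--     For each duplication length L, scan once with a running count c of
--     consecutive positions j where s[j] == s[j + L]; a window of L matches
--     ending at j witnesses a duplication starting at i = j - L + 1.  Within one
--     maximal run of matches every window removes an L-block of the same
--     L-periodic stretch, so all of them yield the same deduplicated string:
--     it is added once, when c first reaches L.
--     '''
--     l = len(s)
--     dedups = set()
--     for dup_length in range(1, l // 2 + 1):
--         c = 0
--         for j in range(l - dup_length):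
--             c = c + 1 if s[j] == s[j + dup_length] else 0
--             if c == dup_length:
--                 i = j + 1 - dup_length
--                 dedups.add(s[:i] + s[i + dup_length:])
--     return dedups
-- ===== Notes on version B (the rewrite author's own statement) =====
-- stated objective: faster
-- what changed: Replaces the O(L) slice comparison at every (length, position) pair by one scan per length keeping a run length of consecutive matching positions (O(1) test), and adds the deduplicated string only once per maximal run since every window of one run yields the same string.
import Mathlib
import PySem

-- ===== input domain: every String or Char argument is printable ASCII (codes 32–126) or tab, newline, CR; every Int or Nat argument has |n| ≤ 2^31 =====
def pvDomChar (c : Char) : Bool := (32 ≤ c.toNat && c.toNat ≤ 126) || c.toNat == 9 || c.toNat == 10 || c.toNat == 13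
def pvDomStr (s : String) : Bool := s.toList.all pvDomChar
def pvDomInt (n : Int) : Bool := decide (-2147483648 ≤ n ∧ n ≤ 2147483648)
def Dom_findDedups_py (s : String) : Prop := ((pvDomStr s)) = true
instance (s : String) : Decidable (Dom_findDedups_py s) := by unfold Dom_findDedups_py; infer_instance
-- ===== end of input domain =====

-- B replaces A's O(L) slice comparison at every (length, position) pair by one scan per
-- length maintaining the run length of consecutive matching positions, adding the result
-- string once per maximal run (objective: faster).

-- ===== PORT A =====
def findDedups_py (s : String) : List String :=
  let cs := s.toList
  let l := cs.length
  (List.range (l / 2)).foldl (fun dedups (dlm : Nat) =>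
    let dup_length := dlm + 1
    (List.range (l - 2 * dup_length + 1)).foldl (fun dedups (i : Nat) =>
      let first := PySem.List.slice cs (some (i : Int)) (some ((i : Int) + (dup_length : Int)))
      let second := PySem.List.slice cs (some ((i : Int) + (dup_length : Int)))
        (some ((i : Int) + 2 * (dup_length : Int)))
      if first = second then
        PySem.Set.add dedups (String.ofList (PySem.List.slice cs none (some (i : Int)) ++
          PySem.List.slice cs (some ((i : Int) + (dup_length : Int))) none))
      else dedups) dedups) PySem.Set.empty

-- ===== PORT B =====
def findDedups_py_alt (s : String) : List String :=
  let cs := s.toList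
  let l := cs.length
  (List.range (l / 2)).foldl (fun dedups (dlm : Nat) =>
    let dup_length := dlm + 1
    ((List.range (l - dup_length)).foldl (fun (st : Nat × PySem.Set String) (j : Nat) =>
      let c := if cs[j]? = cs[j + dup_length]? then st.1 + 1 else 0
      if c = dup_length then
        let i := j + 1 - dup_length
        (c, PySem.Set.add st.2 (String.ofList (PySem.List.slice cs none (some (i : Int)) ++
          PySem.List.slice cs (some ((i : Int) + (dup_length : Int))) none)))
      else (c, st.2)) (0, dedups)).2) PySem.Set.empty

-- ===== PRECONDITION & SPEC =====
def Spec_findDedups_py (s : String) (out : List String) : Prop := out = findDedups_py_alt s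
instance (s : String) (out : List String) : Decidable (Spec_findDedups_py s out) := by unfold Spec_findDedups_py; infer_instance

-- ===== CLAIM (what is proved, stated in full; the proofs are below) =====
def Claim_equal_findDedups_py : Prop := ∀ (s : String), Dom_findDedups_py s → Spec_findDedups_py s (findDedups_py s)

-- ===== LEMMAS AND PROOFS =====

/-- Run length of consecutive positions `j' ≤ j` with `cs[j'] = cs[j' + L]`, ending at `j`. -/
def runF (cs : List Char) (L : Nat) : Nat → Nat
  | 0 => if cs[0]? = cs[0 + L]? then 0 + 1 else 0
  | j + 1 => if cs[j + 1]? = cs[j + 1 + L]? then runF cs L j + 1 else 0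

theorem runF_le (cs : List Char) (L : Nat) : ∀ j, runF cs L j ≤ j + 1 := by
  intro j
  induction j with
  | zero => simp [runF]; split <;> omega
  | succ j ih => simp only [runF]; split <;> omega

theorem runF_ge_iff (cs : List Char) (L : Nat) :
    ∀ j t, t ≤ runF cs L j ↔ ∀ k, k < t → k ≤ j ∧ cs[j - k]? = cs[j - k + L]? := by
  intro j
  induction j with
  | zero =>
    intro t
    simp only [runF]
    split
    · rename_i h
      constructor
      · intro ht k hk
        have hk0 : k = 0 := by omega
        subst hk0; exact ⟨le_refl 0, h⟩
      · intro h2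
        by_contra hc
        have ht : 2 ≤ t := by omega
        have := (h2 1 (by omega)).1
        omega
    · rename_i h
      constructor
      · intro ht k hk
        omega
      · intro h2
        by_contra hc
        have ht : 1 ≤ t := by omega
        exact h (by simpa using (h2 0 (by omega)).2)
  | succ j ih =>
    intro t
    simp only [runF]
    split
    · rename_i h
      have step : t ≤ runF cs L j + 1 ↔ t - 1 ≤ runF cs L j := by omega
      rw [step, ih (t - 1)]
      constructor
      · intro h2 k hk
        cases k with
        | zero => exact ⟨by omega, by simpa using h⟩
        | succ k' =>
          have := h2 k' (by omega)
          refine ⟨by omega, ?_⟩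
          have e : j + 1 - (k' + 1) = j - k' := by omega
          rw [e]; exact this.2
      · intro h2 k hk
        have := h2 (k + 1) (by omega)
        refine ⟨by omega, ?_⟩
        have e : j - k = j + 1 - (k + 1) := by omega
        rw [e]; exact this.2
    · rename_i h
      constructor
      · intro ht k hk; omega
      · intro h2
        by_contra hc
        have ht : 1 ≤ t := by omega
        exact h (by simpa using (h2 0 (by omega)).2)

theorem forall_window (P : Nat → Prop) (i L : Nat) :
    (∀ k, k < L → P (i + L - 1 - k)) ↔ (∀ k, k < L → P (i + k)) := by
  constructor
  · intro h k hk
    have := h (L - 1 - k) (by omega)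
    have e : i + L - 1 - (L - 1 - k) = i + k := by omega
    rwa [e] at this
  · intro h k hk
    have e : i + L - 1 - k = i + (L - 1 - k) := by omega
    rw [e]; exact h _ (by omega)

theorem slice_eq_iff (cs : List Char) (i L : Nat) :
    (PySem.List.slice cs (some (i : Int)) (some ((i : Int) + (L : Int))) =
      PySem.List.slice cs (some ((i : Int) + (L : Int))) (some ((i : Int) + 2 * (L : Int)))) ↔
    (∀ k, k < L → cs[i + k]? = cs[i + k + L]?) := by
  have e1 : (i : Int) + (L : Int) = ((i + L : Nat) : Int) := by push_cast; ring
  have e2 : (i : Int) + 2 * (L : Int) = ((i + L : Nat) : Int) + ((L : Nat) : Int) := by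
    push_cast; ring
  have f2 : PySem.List.slice cs (some ((i : Int) + (L : Int)))
      (some ((i : Int) + 2 * (L : Int))) = (cs.drop (i + L)).take L := by
    rw [e1, e2]; exact PySem.List.slice_natCast_add cs (i + L) L
  rw [PySem.List.slice_natCast_add, f2]
  constructor
  · intro h k hk
    have := congrArg (fun t => t[k]?) h
    simpa [List.getElem?_take, List.getElem?_drop, hk, Nat.add_comm, Nat.add_left_comm,
      Nat.add_assoc] using this
  · intro h
    apply List.ext_getElem?
    intro n
    by_cases hn : n < L
    · have := h n hn
      simp only [List.getElem?_take, List.getElem?_drop, hn, if_pos]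
      have e3 : i + L + n = i + n + L := by omega
      rw [e3]; exact this
    · simp [hn]

theorem cond_iff (cs : List Char) (i L : Nat) (hL : 1 ≤ L) :
    L ≤ runF cs L (i + L - 1) ↔ (∀ k, k < L → cs[i + k]? = cs[i + k + L]?) := by
  rw [runF_ge_iff]
  constructor
  · intro h
    have h' : ∀ k, k < L → cs[i + L - 1 - k]? = cs[i + L - 1 - k + L]? :=
      fun k hk => (h k hk).2
    have := (forall_window (fun m => cs[m]? = cs[m + L]?) i L).mp h'
    intro k hk
    exact this k hk
  · intro h k hk
    refine ⟨by omega, ?_⟩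
    have := (forall_window (fun m => cs[m]? = cs[m + L]?) i L).mpr h
    exact this k hk

theorem foldl_ext_mem {α β : Type} (f g : β → α → β) (xs : List α)
    (h : ∀ a ∈ xs, ∀ b, f b a = g b a) : ∀ b, xs.foldl f b = xs.foldl g b := by
  induction xs with
  | nil => intro b; rfl
  | cons x xs ih =>
    intro b
    simp only [List.foldl_cons]
    rw [h x (by simp)]
    exact ih (fun a ha b => h a (by simp [ha]) b) _

theorem foldl_id {α β : Type} (g : β → α → β) (xs : List α)
    (h : ∀ a ∈ xs, ∀ b, g b a = b) : ∀ b, xs.foldl g b = b := by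
  induction xs with
  | nil => intro b; rfl
  | cons x xs ih =>
    intro b
    simp only [List.foldl_cons, h x (by simp)]
    exact ih (fun a ha b => h a (by simp [ha]) b) _

/-- The string B adds for a run ending at position `j` (dup length `L`). -/
def strB (cs : List Char) (L j : Nat) : String :=
  String.ofList (PySem.List.slice cs none (some ((j + 1 - L : Nat) : Int)) ++
    PySem.List.slice cs (some (((j + 1 - L : Nat) : Int) + (L : Int))) none)

/-- B's inner pair-state fold, split into the tracked counter and a plain conditional-add fold. -/
theorem pairFold (cs : List Char) (L : Nat) :
    ∀ m d, (List.range m).foldl (fun (st : Nat × PySem.Set String) (j : Nat) =>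
        let c := if cs[j]? = cs[j + L]? then st.1 + 1 else 0
        if c = L then
          let i := j + 1 - L
          (c, PySem.Set.add st.2 (String.ofList (PySem.List.slice cs none (some (i : Int)) ++
            PySem.List.slice cs (some ((i : Int) + (L : Int))) none)))
        else (c, st.2)) (0, d) =
      ((if m = 0 then 0 else runF cs L (m - 1)),
        (List.range m).foldl (fun d (j : Nat) => if runF cs L j = L then
          PySem.Set.add d (strB cs L j) else d) d) := by
  intro m d
  induction m with
  | zero => rfl
  | succ m ih =>
    rw [List.range_succ, List.foldl_append, List.foldl_append, ih]
    simp only [List.foldl_cons, List.foldl_nil]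
    have hc : (if cs[m]? = cs[m + L]? then (if m = 0 then 0 else runF cs L (m - 1)) + 1 else 0)
        = runF cs L m := by
      cases m with
      | zero => simp [runF]
      | succ m' => simp [runF]
    simp only [hc, strB]
    split <;> simp

/-- The string A adds for a duplication starting at `i` (dup length `L`), in drop/take form. -/
def sA (cs : List Char) (L i : Nat) : String := String.ofList (cs.take i ++ cs.drop (i + L))

theorem runF_pos_succ (cs : List Char) (L j : Nat) (h : 0 < runF cs L (j + 1)) :
    runF cs L (j + 1) = runF cs L j + 1 := by
  simp only [runF] at h ⊢
  split
  · rfl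
  · rename_i hm; rw [if_neg hm] at h; omega

theorem match_first (cs : List Char) (i L : Nat) (hL : 1 ≤ L)
    (h : L ≤ runF cs L (i + L - 1)) : cs[i]? = cs[i + L]? := by
  have := (cond_iff cs i L hL).mp h 0 (by omega)
  simpa using this

theorem set_add_of_mem {x : String} {s : PySem.Set String} (h : x ∈ s) :
    PySem.Set.add s x = s := by
  simp [PySem.Set.add, PySem.Set.contains, h]

theorem sA_adj (cs : List Char) (L i : Nat) (hi : i + L < cs.length)
    (hm : cs[i]? = cs[i + L]?) : sA cs L (i + 1) = sA cs L i := by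
  have hiL : i < cs.length := by omega
  unfold sA
  congr 1
  rw [List.take_add_one, List.drop_eq_getElem_cons hi]
  rw [List.getElem?_eq_getElem hiL, List.getElem?_eq_getElem hi] at hm
  have hchar : cs[i] = cs[i + L] := Option.some.inj hm
  simp only [List.getElem?_eq_getElem hiL, Option.toList_some]
  rw [List.append_assoc]
  have e : i + 1 + L = i + L + 1 := by omega
  rw [e, hchar]
  rfl

/-- A's conditional-add fold (run-length form). -/
def fA (cs : List Char) (L : Nat) (d : PySem.Set String) (i : Nat) : PySem.Set String :=
  if L ≤ runF cs L (i + L - 1) then PySem.Set.add d (sA cs L i) else d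

/-- B's conditional-add fold (adds only when the run first reaches length `L`). -/
def fB (cs : List Char) (L : Nat) (d : PySem.Set String) (i : Nat) : PySem.Set String :=
  if runF cs L (i + L - 1) = L then PySem.Set.add d (sA cs L i) else d

/-- Within one maximal run all windows add the same string, so adding at every window
(A) and adding only at the first window of the run (B) build the same set. -/
theorem runFold (cs : List Char) (L : Nat) (hL : 1 ≤ L) :
    ∀ m, m + 2 * L ≤ cs.length + 1 → ∀ d : PySem.Set String,
      ((List.range m).foldl (fA cs L) d = (List.range m).foldl (fB cs L) d) ∧
      (∀ prev, m = prev + 1 → L ≤ runF cs L (prev + L - 1) →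
        sA cs L prev ∈ (List.range m).foldl (fA cs L) d) := by
  intro m
  induction m with
  | zero => intro _ d; exact ⟨rfl, fun prev h => by omega⟩
  | succ m ih =>
    intro hb d
    obtain ⟨hEq, hMem⟩ := ih (by omega) d
    rw [List.range_succ, List.foldl_append, List.foldl_append]
    simp only [List.foldl_cons, List.foldl_nil]
    constructor
    · rw [← hEq]
      by_cases h1 : runF cs L (m + L - 1) = L
      · rw [fA, fB, if_pos (le_of_eq h1.symm), if_pos h1]
      · by_cases h2 : L ≤ runF cs L (m + L - 1)
        · -- the run is longer than L: A re-adds the string added one step earlier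
          have hrle := runF_le cs L (m + L - 1)
          have hm1 : 1 ≤ m := by omega
          obtain ⟨prev, rfl⟩ : ∃ prev, m = prev + 1 := ⟨m - 1, by omega⟩
          have e1 : prev + 1 + L - 1 = (prev + L - 1) + 1 := by omega
          have hpos : 0 < runF cs L (prev + 1 + L - 1) := by omega
          rw [e1] at hpos h2 h1
          have hstep := runF_pos_succ cs L (prev + L - 1) hpos
          have hprev : L ≤ runF cs L (prev + L - 1) := by omega
          have hmem := hMem prev rfl hprev
          have hadj : sA cs L (prev + 1) = sA cs L prev :=
            sA_adj cs L prev (by omega) (match_first cs prev L hL hprev)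
          rw [fA, fB, if_pos (by rw [e1]; omega : L ≤ runF cs L (prev + 1 + L - 1)), e1, if_neg h1, hadj, set_add_of_mem hmem]
        · rw [fA, fB, if_neg h2, if_neg h1]
    · intro prev hpm hP
      have hpm' : prev = m := by omega
      subst hpm'
      rw [fA, if_pos hP]
      exact (PySem.Set.mem_add _ _ _).mpr (Or.inr rfl)

theorem strB_eq_sA (cs : List Char) (L i : Nat) (hL : 1 ≤ L) :
    strB cs L (L - 1 + i) = sA cs L i := by
  have ei : (L - 1 + i) + 1 - L = i := by omega
  unfold strB sA
  rw [ei]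
  have e2 : ((i : Nat) : Int) + ((L : Nat) : Int) = ((i + L : Nat) : Int) := by push_cast; ring
  rw [e2, PySem.List.slice_to_natCast, PySem.List.slice_from_natCast]

theorem strA_eq_sA (cs : List Char) (L i : Nat) :
    String.ofList (PySem.List.slice cs none (some (i : Int)) ++
      PySem.List.slice cs (some ((i : Int) + (L : Int))) none) = sA cs L i := by
  unfold sA
  have e2 : ((i : Nat) : Int) + ((L : Nat) : Int) = ((i + L : Nat) : Int) := by push_cast; ring
  rw [e2, PySem.List.slice_to_natCast, PySem.List.slice_from_natCast]

theorem inner_eq (cs : List Char) (L : Nat) (hL : 1 ≤ L) (h2L : 2 * L ≤ cs.length) :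
    ∀ d : PySem.Set String,
      (List.range (cs.length - L)).foldl
        (fun d (j : Nat) => if runF cs L j = L then PySem.Set.add d (strB cs L j) else d) d =
      (List.range (cs.length - 2 * L + 1)).foldl (fun dedups (i : Nat) =>
        if PySem.List.slice cs (some (i : Int)) (some ((i : Int) + (L : Int))) =
            PySem.List.slice cs (some ((i : Int) + (L : Int)))
              (some ((i : Int) + 2 * (L : Int))) then
          PySem.Set.add dedups (String.ofList (PySem.List.slice cs none (some (i : Int)) ++
            PySem.List.slice cs (some ((i : Int) + (L : Int))) none))
        else dedups) d := by
  intro d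
  have hsplit : cs.length - L = (L - 1) + (cs.length - 2 * L + 1) := by omega
  rw [hsplit, List.range_add, List.foldl_append, List.foldl_map]
  -- the first L-1 positions can never carry a run of length L
  have hid : (List.range (L - 1)).foldl
      (fun d (j : Nat) => if runF cs L j = L then PySem.Set.add d (strB cs L j) else d) d = d :=
    foldl_id _ _ (fun j hj b => by
      simp only [List.mem_range] at hj
      have hr := runF_le cs L j
      rw [if_neg (by omega)]) d
  rw [hid]
  have hB : (List.range (cs.length - 2 * L + 1)).foldl
      (fun d (i : Nat) => if runF cs L (L - 1 + i) = L then PySem.Set.add d (strB cs L (L - 1 + i))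
        else d) d = (List.range (cs.length - 2 * L + 1)).foldl (fB cs L) d := by
    apply foldl_ext_mem
    intro i _ b
    have ej : L - 1 + i = i + L - 1 := by omega
    rw [strB_eq_sA cs L i hL, fB, ej]
  have hA : (List.range (cs.length - 2 * L + 1)).foldl (fun dedups (i : Nat) =>
      if PySem.List.slice cs (some (i : Int)) (some ((i : Int) + (L : Int))) =
          PySem.List.slice cs (some ((i : Int) + (L : Int)))
            (some ((i : Int) + 2 * (L : Int))) then
        PySem.Set.add dedups (String.ofList (PySem.List.slice cs none (some (i : Int)) ++
          PySem.List.slice cs (some ((i : Int) + (L : Int))) none))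
      else dedups) d = (List.range (cs.length - 2 * L + 1)).foldl (fA cs L) d := by
    apply foldl_ext_mem
    intro i _ b
    have hcond : (PySem.List.slice cs (some (i : Int)) (some ((i : Int) + (L : Int))) =
        PySem.List.slice cs (some ((i : Int) + (L : Int)))
          (some ((i : Int) + 2 * (L : Int)))) ↔ L ≤ runF cs L (i + L - 1) := by
      rw [cond_iff cs i L hL, slice_eq_iff]
    rw [fA, strA_eq_sA cs L i]
    by_cases hc : L ≤ runF cs L (i + L - 1)
    · rw [if_pos hc, if_pos (hcond.mpr hc)]
    · rw [if_neg hc, if_neg (fun h => hc (hcond.mp h))]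
  rw [hB, hA]
  exact ((runFold cs L hL (cs.length - 2 * L + 1) (by omega) d).1).symm

-- ===== VERDICT (by name: the statement is the Claim_ definition above) =====
theorem findDedups_py_spec : Claim_equal_findDedups_py := by
  intro s _
  unfold Spec_findDedups_py findDedups_py findDedups_py_alt
  simp only []
  apply foldl_ext_mem
  intro dlm hdlm d
  simp only [List.mem_range] at hdlm
  have hL : 1 ≤ dlm + 1 := by omega
  have h2L : 2 * (dlm + 1) ≤ s.toList.length := by omega
  rw [pairFold s.toList (dlm + 1) (s.toList.length - (dlm + 1)) d]
  exact (inner_eq s.toList (dlm + 1) hL h2L d).symm
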